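-- pv_equiv track=rewrite | github.com/cynotecy/wuyuanxiangmu | postgraduate_program/operationAndDisplaySystem/controller/usrp_controller/specEnvelope_shibie/functions_v3.py | bodongxing
-- ===== SOURCE A (Python) =====
-- def bodongxing(sig,step4):
--     num=0
--     l = len(sig)
--     n = len(sig) // step4
--     for i in range(1,n+1):
--         maxx = max(sig[step4*(i-1):i*step4])
--         minn = min(sig[step4*(i-1):i*step4])
--         if (maxx-minn)>=10:
--         #if maxx >= 10:
--             num+=1
--     return num
-- ===== SOURCE B (Python) =====
-- def bodongxing(sig, step4):
--     n = len(sig) // step4          # ZeroDivisionError preserved when step4 == 0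
--     rest = sig[:max(n, 0) * step4]  # ignore trailing elements beyond the full windows
--     num = 0
--     while rest:
--         mx = mn = rest[0]
--         for x in rest[1:step4]:
--             if x > mx:
--                 mx = x
--             if x < mn:
--                 mn = x
--         if mx - mn >= 10:
--             num += 1
--         rest = rest[step4:]
--     return num
-- ===== Notes on version B (the rewrite author's own statement) =====
-- stated objective: alternative
-- what changed: B replaces A's per-window slicing with two builtin max/min scans by one truncation up front and a single sweep that consumes the list chunk by chunk, maintaining running max/min with if-comparisons and counting at each chunk boundary.
import Mathlib
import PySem

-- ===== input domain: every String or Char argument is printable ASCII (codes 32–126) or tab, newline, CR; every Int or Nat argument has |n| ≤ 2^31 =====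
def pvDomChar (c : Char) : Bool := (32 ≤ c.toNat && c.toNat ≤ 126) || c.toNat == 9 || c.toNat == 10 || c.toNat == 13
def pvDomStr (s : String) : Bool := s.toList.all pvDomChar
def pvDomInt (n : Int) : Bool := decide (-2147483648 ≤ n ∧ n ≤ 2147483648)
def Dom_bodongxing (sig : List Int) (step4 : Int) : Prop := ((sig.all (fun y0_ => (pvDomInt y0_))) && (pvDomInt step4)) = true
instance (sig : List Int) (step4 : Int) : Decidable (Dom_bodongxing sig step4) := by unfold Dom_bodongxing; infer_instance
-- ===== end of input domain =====

-- B counts windows with a single sweep and running max/min instead of A's per-window slicing with builtin max/min; equivalence of the return values is proved for step4 ≠ 0.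

-- ===== PORT A =====
-- A: n = len(sig)//step4; for each window i, slice it and take max/min.
-- Under Pre_ (step4 ≠ 0) every window the loop reaches is nonempty, so the
-- `.getD 0` default on max?/min? (Python would raise on an empty sequence) is never used.
def bodongxing (sig : List Int) (step4 : Int) : Int :=
  let _l : Int := sig.length
  let n : Int := PySem.Int.floordiv sig.length step4
  (PySem.List.pyRange 1 (n + 1) 1).foldl
    (fun num i =>
      let w := PySem.List.slice sig (some (step4 * (i - 1))) (some (i * step4))
      let maxx := (PySem.List.max? w (fun y => y)).getD 0
      let minn := (PySem.List.min? w (fun y => y)).getD 0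
      if maxx - minn ≥ 10 then num + 1 else num) 0

-- ===== PORT B =====
-- running-max/min scan: the inner `for x in rest[1:step4]` loop of Source B
def pvScanMM : List Int → Int → Int → Int × Int
  | [], mx, mn => (mx, mn)
  | x :: t, mx, mn => pvScanMM t (if x > mx then x else mx) (if x < mn then x else mn)

-- the while loop of Source B; k = step4 (positive whenever the list is nonempty),
-- rest[1:step4] = t.take (k-1) and rest[step4:] = t.drop (k-1) on rest = x :: t
def pvChunkLoop (k : Nat) : List Int → Int → Int
  | [], num => num
  | x :: t, num =>
      let p := pvScanMM (t.take (k - 1)) x x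
      pvChunkLoop k (t.drop (k - 1)) (if p.1 - p.2 ≥ 10 then num + 1 else num)
  termination_by xs _ => xs.length
  decreasing_by simp only [List.length_drop, List.length_cons]; omega

def bodongxing_alt (sig : List Int) (step4 : Int) : Int :=
  let n : Int := PySem.Int.floordiv sig.length step4
  let rest := PySem.List.slice sig none (some (max n 0 * step4))
  pvChunkLoop step4.toNat rest 0

-- ===== PRECONDITION & SPEC =====
-- Pre_ excludes step4 = 0, on which A raises ZeroDivisionError.
def Pre_bodongxing (sig : List Int) (step4 : Int) : Prop := step4 ≠ 0
instance (sig : List Int) (step4 : Int) : Decidable (Pre_bodongxing sig step4) := by unfold Pre_bodongxing; infer_instance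
def pvWitness_bodongxing : List Int × Int := ([3, 20, 5, 6, 7], 2)

def Spec_bodongxing (sig : List Int) (step4 : Int) (out : Int) : Prop := out = bodongxing_alt sig step4
instance (sig : List Int) (step4 : Int) (out : Int) : Decidable (Spec_bodongxing sig step4 out) := by unfold Spec_bodongxing; infer_instance

-- ===== CLAIM (what is proved, stated in full; the proofs are below) =====
def Claim_equal_bodongxing : Prop := ∀ (sig : List Int) (step4 : Int), Dom_bodongxing sig step4 → Pre_bodongxing sig step4 → Spec_bodongxing sig step4 (bodongxing sig step4)

-- ===== LEMMAS AND PROOFS =====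

-- proof-side per-window contribution (window = first k elements of ys)
def pvG (k : Nat) : List Int → Int
  | [] => 0
  | x :: t =>
      if (t.take (k - 1)).foldl max x - (t.take (k - 1)).foldl min x ≥ 10 then 1 else 0

-- proof-side sum over the first n chunks of size k
def pvCSum (k : Nat) : Nat → List Int → Int
  | 0, _ => 0
  | n + 1, ys => pvG k ys + pvCSum k n (ys.drop k)

theorem pvScanMM_eq (s : List Int) (mx mn : Int) :
    pvScanMM s mx mn = (s.foldl max mx, s.foldl min mn) := by
  induction s generalizing mx mn with
  | nil => rfl
  | cons x t ih =>
      have h1 : (if x > mx then x else mx) = max mx x := by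
        rw [max_def]; split_ifs <;> omega
      have h2 : (if x < mn then x else mn) = min mn x := by
        rw [min_def]; split_ifs <;> omega
      simp [pvScanMM, h1, h2, ih, List.foldl]

theorem pvChunkLoop_eq (k : Nat) (hk : 0 < k) :
    ∀ (n : Nat) (ys : List Int) (num : Int), ys.length = n * k →
      pvChunkLoop k ys num = num + pvCSum k n ys := by
  intro n
  induction n with
  | zero =>
      intro ys num h
      have : ys = [] := List.eq_nil_of_length_eq_zero (by simpa using h)
      subst this; unfold pvChunkLoop; simp [pvCSum]
  | succ n ih =>
      intro ys num h
      match ys with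
      | [] => simp [Nat.succ_mul] at h; omega
      | x :: t =>
          have ht : t.length = n * k + (k - 1) := by
            simp [Nat.succ_mul] at h ⊢; omega
          have hdrop : (t.drop (k - 1)).length = n * k := by
            simp [List.length_drop]; omega
          have hd : (x :: t).drop k = t.drop (k - 1) := by
            cases k with
            | zero => omega
            | succ m => simp
          unfold pvChunkLoop
          rw [pvScanMM_eq, ih _ _ hdrop]
          simp only [pvCSum, pvG, hd]
          split_ifs <;> ring

theorem pvG_take (k : Nat) (hk : 0 < k) (m : Nat) (hm : k ≤ m) (ys : List Int) :
    pvG k (ys.take m) = pvG k ys := by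
  cases ys with
  | nil => simp
  | cons x t =>
      have : m = (m - 1) + 1 := by omega
      rw [this]
      simp only [pvG, List.take_succ_cons]
      rw [List.take_take]
      have : min (k - 1) (m - 1) = k - 1 := by omega
      rw [this]

theorem pvCSum_take (k : Nat) (hk : 0 < k) :
    ∀ (n : Nat) (ys : List Int), pvCSum k n (ys.take (n * k)) = pvCSum k n ys := by
  intro n
  induction n with
  | zero => intro ys; rfl
  | succ n ih =>
      intro ys
      have hkm : k ≤ (n + 1) * k := by nlinarith
      rw [pvCSum, pvCSum, pvG_take k hk _ hkm, List.drop_take]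
      have : (n + 1) * k - k = n * k := by simp [Nat.succ_mul]
      rw [this, ih]

theorem pvCSum_last (k : Nat) :
    ∀ (n : Nat) (ys : List Int),
      pvCSum k (n + 1) ys = pvCSum k n ys + pvG k (ys.drop (n * k)) := by
  intro n
  induction n with
  | zero => intro ys; simp [pvCSum]
  | succ n ih =>
      intro ys
      rw [pvCSum, ih, pvCSum, List.drop_drop]
      rw [show k + n * k = (n + 1) * k from by ring, add_assoc]

-- A's window i = n+1, in terms of drop/take
theorem pvAWin_eq (sig : List Int) (k : Nat) (hk : 0 < k) (n : Nat)
    (hlen : (n + 1) * k ≤ sig.length) (S : Int) :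
    (let w := PySem.List.slice sig (some ((k : Int) * (((n : Int) + 1) - 1))) (some (((n : Int) + 1) * (k : Int)))
     let maxx := (PySem.List.max? w (fun y => y)).getD 0
     let minn := (PySem.List.min? w (fun y => y)).getD 0
     if maxx - minn ≥ 10 then S + 1 else S)
    = S + pvG k (sig.drop (n * k)) := by
  have hcast1 : ((k : Int) * (((n : Int) + 1) - 1)) = ((n * k : Nat) : Int) := by
    push_cast; ring
  have hcast2 : (((n : Int) + 1) * (k : Int)) = (((n + 1) * k : Nat) : Int) := by
    push_cast; ring
  rw [hcast1, hcast2, PySem.List.slice_natCast]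
  have htk : (n + 1) * k - n * k = k := by simp [Nat.succ_mul]
  rw [htk]
  have hdl : k ≤ (sig.drop (n * k)).length := by
    simp [List.length_drop]; omega
  obtain ⟨x, t, hxt⟩ : ∃ x t, sig.drop (n * k) = x :: t := by
    cases hd : sig.drop (n * k) with
    | nil => rw [hd] at hdl; simp at hdl; omega
    | cons x t => exact ⟨x, t, rfl⟩
  rw [hxt]
  have : k = (k - 1) + 1 := by omega
  rw [this]
  simp only [List.take_succ_cons, PySem.List.max?_id_cons, PySem.List.min?_id_cons,
    Option.getD_some, pvG, Nat.add_sub_cancel]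
  split_ifs <;> ring

theorem pvFold_eq (sig : List Int) (k : Nat) (hk : 0 < k) :
    ∀ (n : Nat), n * k ≤ sig.length →
      (PySem.List.pyRange 1 ((n : Int) + 1) 1).foldl
        (fun num i =>
          let w := PySem.List.slice sig (some ((k : Int) * (i - 1))) (some (i * (k : Int)))
          let maxx := (PySem.List.max? w (fun y => y)).getD 0
          let minn := (PySem.List.min? w (fun y => y)).getD 0
          if maxx - minn ≥ 10 then num + 1 else num) 0
      = pvCSum k n sig := by
  intro n
  induction n with
  | zero =>
      intro _
      rw [show ((0 : Nat) : Int) + 1 = 1 by norm_num,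
        PySem.List.pyRange_one_eq_nil (by omega)]
      rfl
  | succ n ih =>
      intro hlen
      have hle : n * k ≤ sig.length := le_trans (by nlinarith) hlen
      have hsp : ((n + 1 : Nat) : Int) + 1 = (((n : Nat) : Int) + 1) + 1 := by push_cast; ring
      rw [hsp, PySem.List.pyRange_one_succ_right (by omega), List.foldl_append, ih hle]
      simp only [List.foldl_cons, List.foldl_nil]
      rw [pvAWin_eq sig k hk n (by exact_mod_cast hlen) (pvCSum k n sig)]
      rw [pvCSum_last]

theorem bodongxing_spec : Claim_equal_bodongxing := by
  intro sig step4 _hdom hpre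
  unfold Spec_bodongxing bodongxing bodongxing_alt
  rcases lt_trichotomy step4 0 with hneg | hzero | hpos
  · -- step4 < 0: n ≤ 0, both sides count no windows
    have hn : PySem.Int.floordiv (sig.length : Int) step4 ≤ 0 := by
      by_contra h
      rw [not_le] at h
      have := PySem.Int.floordiv_mul_add_mod (sig.length : Int) step4
      -- floordiv * step4 + mod = len; with floordiv ≥ 1 and step4 < 0 the product is < 0,
      -- while mod has the divisor's sign (≤ 0), contradiction with len ≥ 0
      have hms : PySem.Int.mod (sig.length : Int) step4 ≤ 0 :=
        (PySem.Int.mod_neg_bounds (sig.length : Int) hneg).2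
      nlinarith [Int.natCast_nonneg sig.length]
    simp only
    rw [PySem.List.pyRange_one_eq_nil (by omega)]
    have hm : max (PySem.Int.floordiv (sig.length : Int) step4) 0 = 0 := by omega
    rw [hm]
    simp [PySem.List.slice_to, pvChunkLoop]
  · exact absurd hzero hpre
  · -- step4 > 0
    obtain ⟨k, rfl⟩ : ∃ k : Nat, step4 = (k : Int) :=
      ⟨step4.toNat, (Int.toNat_of_nonneg (le_of_lt hpos)).symm⟩
    have hk : 0 < k := by exact_mod_cast hpos
    have hfd : PySem.Int.floordiv (sig.length : Int) (k : Int)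
        = ((sig.length / k : Nat) : Int) := PySem.Int.floordiv_natCast _ _
    set n : Nat := sig.length / k with hn
    have hnk : n * k ≤ sig.length := Nat.div_mul_le_self _ _
    simp only [hfd]
    have hmax : max ((n : Int)) (0 : Int) = (n : Int) := max_eq_left (Int.natCast_nonneg n)
    rw [hmax]
    have hcast : ((n : Int)) * (k : Int) = ((n * k : Nat) : Int) := by push_cast; ring
    rw [hcast, PySem.List.slice_to_natCast]
    have htlen : (sig.take (n * k)).length = n * k := by
      simp [List.length_take]; omega
    have htoNat : ((k : Int)).toNat = k := by simp
    rw [htoNat, pvChunkLoop_eq k hk n _ 0 htlen, pvCSum_take k hk n sig, zero_add]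
    exact pvFold_eq sig k hk n hnk
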